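-- pv_equiv track=rewrite | github.com/Make-magic/Copy_PDF_And_Translate | CopyM_v3.py | format_pdf_text3
-- ===== SOURCE A (Python) =====
-- def format_pdf_text3(text):
--     # 修复被连字符断开的单词，并保留段落之间的换行
--     text = text.replace('-\n', '')
--     lines = text.splitlines()
--
--     formatted_text = ""
--     # 将断行的段落重新连接，但保留段落间的空行
--     for i in range(len(lines)):
--         if lines[i].strip() == "" and (i == 0 or lines[i-1].strip() == ""):
--             # 跳过连续空白行之间的空行
--             continue
--         if lines[i].strip() == "":
--             # 如果是单独的空行，则保留这个段落分隔
--             formatted_text += '\n\n'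
--         else:
--             if i + 1 < len(lines) and lines[i+1].strip() == "":
--                 # 当前行后面跟着空白行，应该是段落结尾
--                 formatted_text += lines[i] + '\n'
--             else:
--                 # 普通行，合并到当前段落
--                 formatted_text += lines[i].strip() + ' '
--     return formatted_text
-- ===== SOURCE B (Python) =====
-- def format_pdf_text3(text):
--     # Group-then-format: split into maximal runs of non-blank lines (paragraphs)
--     # and format each run at once, instead of A's per-index lookback/lookahead scan.
--     lines = text.replace('-\n', '').splitlines()
--     n = len(lines)
--     pieces = []
--     j = 0
--     while j < n:
--         if lines[j].strip() == "":
--             j += 1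
--             continue
--         para = []
--         while j < n and lines[j].strip() != "":
--             para.append(lines[j])
--             j += 1
--         for l in para[:-1]:
--             pieces.append(l.strip() + ' ')
--         if j < n:
--             pieces.append(para[-1] + '\n' + '\n\n')
--         else:
--             pieces.append(para[-1].strip() + ' ')
--     return ''.join(pieces)
-- ===== Notes on version B (the rewrite author's own statement) =====
-- stated objective: alternative
-- what changed: B splits the lines into maximal runs of non-blank lines (paragraphs) with a group-then-format pass and joins the collected pieces once, instead of A's per-index state machine that re-tests the previous and next line at every index and grows the result string by repeated concatenation.
import Mathlib
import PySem

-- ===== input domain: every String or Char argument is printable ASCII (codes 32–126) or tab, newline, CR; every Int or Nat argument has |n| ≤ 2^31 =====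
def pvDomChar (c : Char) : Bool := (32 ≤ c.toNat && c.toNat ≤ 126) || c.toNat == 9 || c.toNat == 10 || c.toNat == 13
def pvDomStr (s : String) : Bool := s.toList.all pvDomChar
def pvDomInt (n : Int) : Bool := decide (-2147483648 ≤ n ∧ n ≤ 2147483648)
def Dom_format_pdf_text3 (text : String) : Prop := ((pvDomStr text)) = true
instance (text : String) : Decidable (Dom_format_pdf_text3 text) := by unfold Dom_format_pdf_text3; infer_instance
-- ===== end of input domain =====

-- B reformats by splitting the lines into maximal runs of non-blank lines (paragraphs)
-- and formatting each run at once, instead of A's per-index lookback/lookahead scan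
-- (objective: alternative decomposition, same cost).


-- shared by both ports: "line.strip() == ''"
def pvBlank (l : String) : Bool := PySem.Str.strip l == ""

-- ===== PORT A =====
def format_pdf_text3 (text : String) : String :=
  let lines := PySem.Str.splitlines (PySem.Str.replace text "-\n" "")
  (PySem.List.pyRange 0 (lines.length : Int) 1).foldl (fun acc i =>
    if pvBlank (PySem.List.pyGetD lines i "") &&
        (i == 0 || pvBlank (PySem.List.pyGetD lines (i - 1) "")) then
      acc
    else if pvBlank (PySem.List.pyGetD lines i "") then
      acc ++ "\n\n"
    else if i + 1 < (lines.length : Int) && pvBlank (PySem.List.pyGetD lines (i + 1) "") then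
      acc ++ PySem.List.pyGetD lines i "" ++ "\n"
    else
      acc ++ PySem.Str.strip (PySem.List.pyGetD lines i "") ++ " ") ""

-- ===== PORT B =====
-- outer while loop of B: skip blank lines, else take the maximal non-blank run as a paragraph
def pvAltGo : List String → List String
  | [] => []
  | l :: rest =>
    if pvBlank l then pvAltGo rest
    else
      let para := l :: rest.takeWhile (fun x => !pvBlank x)
      let rest' := rest.dropWhile (fun x => !pvBlank x)
      para.dropLast.map (fun x => PySem.Str.strip x ++ " ") ++
        (if rest'.isEmpty then [PySem.Str.strip (para.getLastD "") ++ " "]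
         else [para.getLastD "" ++ "\n" ++ "\n\n"]) ++
        pvAltGo rest'
termination_by l => l.length
decreasing_by
  all_goals simp only [List.length_cons]
  · omega
  · exact Nat.lt_succ_of_le (List.length_dropWhile_le _ _)

def format_pdf_text3_alt (text : String) : String :=
  PySem.Str.join "" (pvAltGo (PySem.Str.splitlines (PySem.Str.replace text "-\n" "")))

-- ===== PRECONDITION & SPEC =====
def Spec_format_pdf_text3 (text : String) (out : String) : Prop := out = format_pdf_text3_alt text
instance (text : String) (out : String) : Decidable (Spec_format_pdf_text3 text out) := by unfold Spec_format_pdf_text3; infer_instance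

-- ===== CLAIM (what is proved, stated in full; the proofs are below) =====
def Claim_equal_format_pdf_text3 : Prop := ∀ (text : String), Dom_format_pdf_text3 text → Spec_format_pdf_text3 text (format_pdf_text3 text)

-- ===== LEMMAS AND PROOFS =====

-- common recursive characterisation of A's scan: the flag says "previous line was blank or we are at the start"
def pvSpecGo : Bool → List String → String
  | _, [] => ""
  | prev, l :: rest =>
    if pvBlank l then
      (if prev then "" else "\n\n") ++ pvSpecGo true rest
    else
      (match rest with
       | r :: _ => if pvBlank r then l ++ "\n" else PySem.Str.strip l ++ " "
       | [] => PySem.Str.strip l ++ " ") ++ pvSpecGo false rest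

lemma pvJoinE_nil : PySem.Str.join "" ([] : List String) = "" := by
  apply String.toList_inj.mp
  simp [PySem.Str.toList_join, PySem.Chars.join_nil]

lemma pvJoinE_cons (x : String) (xs : List String) :
    PySem.Str.join "" (x :: xs) = x ++ PySem.Str.join "" xs := by
  apply String.toList_inj.mp
  cases xs with
  | nil => simp [PySem.Str.toList_join, PySem.Chars.join_singleton, PySem.Chars.join_nil]
  | cons y ys =>
    simp [PySem.Str.toList_join, PySem.Chars.join_cons_cons]

lemma pvJoinE_append (xs ys : List String) :
    PySem.Str.join "" (xs ++ ys) = PySem.Str.join "" xs ++ PySem.Str.join "" ys := by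
  induction xs with
  | nil => simp [pvJoinE_nil]
  | cons x xs ih => simp [pvJoinE_cons, ih, String.append_assoc]

lemma pvRun_end (prev : Bool) (para : List String)
    (hne : para ≠ []) (hnb : ∀ x ∈ para, pvBlank x = false) :
    pvSpecGo prev para =
      PySem.Str.join "" (para.dropLast.map (fun x => PySem.Str.strip x ++ " ")) ++
        (PySem.Str.strip (para.getLastD "") ++ " ") := by
  induction para generalizing prev with
  | nil => exact absurd rfl hne
  | cons x xs ih =>
    cases xs with
    | nil => simp [pvSpecGo, hnb x (by simp), pvJoinE_nil]
    | cons y ys =>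
      have hx := hnb x (by simp)
      have hy := hnb y (by simp)
      rw [show pvSpecGo prev (x :: y :: ys) =
        (PySem.Str.strip x ++ " ") ++ pvSpecGo false (y :: ys) by simp [pvSpecGo, hx, hy]]
      rw [ih false (by simp) (fun z hz => hnb z (by simp [hz]))]
      simp [pvJoinE_cons, String.append_assoc]

lemma pvRun_blank (prev : Bool) (para : List String) (b : String) (tail : List String)
    (hne : para ≠ []) (hnb : ∀ x ∈ para, pvBlank x = false) (hb : pvBlank b = true) :
    pvSpecGo prev (para ++ b :: tail) =
      PySem.Str.join "" (para.dropLast.map (fun x => PySem.Str.strip x ++ " ")) ++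
        (para.getLastD "" ++ "\n" ++ "\n\n") ++ pvSpecGo true tail := by
  induction para generalizing prev with
  | nil => exact absurd rfl hne
  | cons x xs ih =>
    cases xs with
    | nil =>
      have hx := hnb x (by simp)
      simp [pvSpecGo, hx, hb, pvJoinE_nil, String.append_assoc]
      rw [← String.append_assoc, show ("\n" ++ "\n\n" : String) = "\n\n\n" from rfl]
    | cons y ys =>
      have hx := hnb x (by simp)
      have hy := hnb y (by simp)
      rw [show pvSpecGo prev ((x :: y :: ys) ++ b :: tail) =
        (PySem.Str.strip x ++ " ") ++ pvSpecGo false ((y :: ys) ++ b :: tail) by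
          simp [pvSpecGo, hx, hy]]
      rw [ih false (by simp) (fun z hz => hnb z (by simp [hz]))]
      simp [pvJoinE_cons, String.append_assoc]

lemma pvJoinE_singleton (x : String) : PySem.Str.join "" [x] = x := by
  rw [pvJoinE_cons, pvJoinE_nil, String.append_empty]

lemma pvAltGo_spec (L : List String) : PySem.Str.join "" (pvAltGo L) = pvSpecGo true L := by
  induction hn : L.length using Nat.strong_induction_on generalizing L with
  | _ n ih =>
  cases L with
  | nil => simp [pvAltGo, pvSpecGo, pvJoinE_nil]
  | cons l rest =>
    by_cases hl : pvBlank l = true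
    · rw [show pvAltGo (l :: rest) = pvAltGo rest by rw [pvAltGo]; simp [hl]]
      rw [ih rest.length (by simp [← hn]) rest rfl]
      simp [pvSpecGo, hl]
    · rw [show pvAltGo (l :: rest) =
        (l :: rest.takeWhile (fun x => !pvBlank x)).dropLast.map (fun x => PySem.Str.strip x ++ " ") ++
          (if (rest.dropWhile (fun x => !pvBlank x)).isEmpty then
              [PySem.Str.strip ((l :: rest.takeWhile (fun x => !pvBlank x)).getLastD "") ++ " "]
           else [(l :: rest.takeWhile (fun x => !pvBlank x)).getLastD "" ++ "\n" ++ "\n\n"]) ++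
          pvAltGo (rest.dropWhile (fun x => !pvBlank x)) by rw [pvAltGo]; simp [hl]]
      have hsplit : l :: rest = (l :: rest.takeWhile (fun x => !pvBlank x)) ++ rest.dropWhile (fun x => !pvBlank x) := by
        simp [List.takeWhile_append_dropWhile]
      have hnb : ∀ x ∈ l :: rest.takeWhile (fun x => !pvBlank x), pvBlank x = false := by
        intro x hx
        rcases List.mem_cons.mp hx with h | h
        · simpa [h] using hl
        · have := List.mem_takeWhile_imp h; simpa using this
      rcases hrest' : rest.dropWhile (fun x => !pvBlank x) with _ | ⟨b, tail⟩
      · conv_rhs => rw [hsplit, hrest', List.append_nil]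
        rw [pvRun_end true _ (by simp) hnb]
        simp [pvJoinE_append, pvJoinE_singleton, pvAltGo]
      · have hb : pvBlank b = true := by
          have := List.head?_dropWhile_not (fun x => !pvBlank x) rest
          rw [hrest'] at this
          simpa using this
        conv_rhs => rw [hsplit, hrest']
        rw [pvRun_blank true _ b tail (by simp) hnb hb]
        rw [show pvAltGo (b :: tail) = pvAltGo tail by rw [pvAltGo]; simp [hb]]
        rw [pvJoinE_append, pvJoinE_append,
          ih tail.length (by
            have h1 : (rest.dropWhile (fun x => !pvBlank x)).length ≤ rest.length :=
              List.length_dropWhile_le _ _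
            rw [hrest'] at h1
            simp only [List.length_cons] at h1
            simp only [← hn, List.length_cons]
            omega) tail rfl]
        simp [pvJoinE_singleton, String.append_assoc]

lemma pvFoldA' (L : List String) : ∀ (d k : Nat) (acc : String), L.length - k = d →
    (PySem.List.pyRange (k : Int) (L.length : Int) 1).foldl (fun acc i =>
      if pvBlank (PySem.List.pyGetD L i "") &&
          (i == 0 || pvBlank (PySem.List.pyGetD L (i - 1) "")) then
        acc
      else if pvBlank (PySem.List.pyGetD L i "") then
        acc ++ "\n\n"
      else if i + 1 < (L.length : Int) && pvBlank (PySem.List.pyGetD L (i + 1) "") then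
        acc ++ PySem.List.pyGetD L i "" ++ "\n"
      else
        acc ++ PySem.Str.strip (PySem.List.pyGetD L i "") ++ " ") acc
    = acc ++ pvSpecGo (k == 0 || pvBlank (L.getD (k - 1) "")) (L.drop k) := by
  intro d
  induction d with
  | zero =>
    intro k acc hk
    rw [PySem.List.pyRange_one_eq_nil (by exact_mod_cast Nat.le_of_sub_eq_zero hk),
      List.drop_eq_nil_of_le (Nat.le_of_sub_eq_zero hk)]
    simp [pvSpecGo]
  | succ d ihd =>
    intro k acc hk
    have hklt : k < L.length := by omega
    rw [PySem.List.pyRange_one_cons (by exact_mod_cast hklt)]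
    simp only [List.foldl_cons]
    rw [show ((k : Int) + 1) = (((k + 1 : Nat)) : Int) by push_cast; ring]
    rw [ihd (k + 1) _ (by omega)]
    conv_rhs => rw [List.drop_eq_getElem_cons hklt]
    have hgk : PySem.List.pyGetD L (k : Int) "" = L[k] := by
      simp [List.getD_eq_getElem?_getD, List.getElem?_eq_getElem hklt]
    by_cases hcur : pvBlank L[k] = true
    · -- current line blank
      by_cases hprev : ((k : Int) == 0 || pvBlank (PySem.List.pyGetD L ((k : Int) - 1) "")) = true
      · rw [if_pos (by simp [hgk, hcur, hprev])]
        have hflag : ((k == 0 : Bool) || pvBlank (L.getD (k - 1) "")) = true := by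
          rcases Nat.eq_zero_or_pos k with h0 | hpos
          · simp [h0]
          · have : ((k : Int) == 0) = false := by simp; omega
            rw [this, Bool.false_or] at hprev
            have : ((k : Int) - 1) = ((k - 1 : Nat) : Int) := by push_cast [Nat.cast_sub hpos]; ring
            rw [this] at hprev
            simp only [PySem.List.pyGetD_natCast] at hprev
            simp only [Bool.or_eq_true, beq_iff_eq]
            exact Or.inr hprev
        rw [hflag]
        have hflag' : ((k + 1 == 0 : Bool) || pvBlank (L.getD (k + 1 - 1) "")) = true := by
          simp [List.getD_eq_getElem?_getD, List.getElem?_eq_getElem hklt, hcur]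
        rw [hflag']
        simp [pvSpecGo, hcur]
      · rw [if_neg (by simp_all), if_pos (by simp [hgk, hcur])]
        have hflag : ((k == 0 : Bool) || pvBlank (L.getD (k - 1) "")) = false := by
          rcases Nat.eq_zero_or_pos k with h0 | hpos
          · exfalso; apply hprev; simp [h0]
          · have hk0 : ((k : Int) == 0) = false := by simp; omega
            have hc : ((k : Int) - 1) = ((k - 1 : Nat) : Int) := by push_cast [Nat.cast_sub hpos]; ring
            rw [hk0, Bool.false_or, hc] at hprev
            have : (k == 0) = false := by simp; omega
            rw [this, Bool.false_or]
            simpa [List.getD_eq_getElem?_getD] using hprev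
        rw [hflag]
        have hflag' : ((k + 1 == 0 : Bool) || pvBlank (L.getD (k + 1 - 1) "")) = true := by
          simp [List.getD_eq_getElem?_getD, List.getElem?_eq_getElem hklt, hcur]
        rw [hflag']
        simp [pvSpecGo, hcur, String.append_assoc]
    · -- current line not blank
      rw [if_neg (by simp [hgk, hcur]), if_neg (by simp [hgk, hcur])]
      have hflag' : ((k + 1 == 0 : Bool) || pvBlank (L.getD (k + 1 - 1) "")) = false := by
        simp [List.getD_eq_getElem?_getD, List.getElem?_eq_getElem hklt, hcur]
      rw [hflag']
      by_cases hnext : k + 1 < L.length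
      · have hdrop1 : L.drop (k+1) = L[k+1] :: L.drop (k+2) := List.drop_eq_getElem_cons hnext
        have hgk1 : PySem.List.pyGetD L (((k + 1 : Nat)) : Int) "" = L[k+1] := by
          rw [PySem.List.pyGetD_natCast]
          simp [List.getD_eq_getElem?_getD, List.getElem?_eq_getElem hnext]
        by_cases hbn : pvBlank L[k+1] = true
        · rw [if_pos (by
            simp only [Bool.and_eq_true, decide_eq_true_eq, hgk1]
            exact ⟨by exact_mod_cast hnext, hbn⟩)]
          rw [hdrop1]
          simp [pvSpecGo, hcur, hbn, hgk, String.append_assoc]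
        · rw [if_neg (by
            simp only [Bool.and_eq_true, decide_eq_true_eq, hgk1]
            intro h
            exact hbn h.2)]
          rw [hdrop1]
          simp [pvSpecGo, hcur, hbn, hgk, String.append_assoc]
      · have hdrop1 : L.drop (k+1) = [] := List.drop_eq_nil_of_le (by omega)
        rw [if_neg (by simp; intro h; exfalso; apply hnext; exact_mod_cast h)]
        rw [hdrop1]
        simp [pvSpecGo, hcur, hgk, String.append_assoc]

-- ===== VERDICT (by name: the statement is the Claim_ definition above) =====
theorem format_pdf_text3_spec : Claim_equal_format_pdf_text3 := by
  intro text _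
  unfold Spec_format_pdf_text3 format_pdf_text3 format_pdf_text3_alt
  have h := pvFoldA' (PySem.Str.splitlines (PySem.Str.replace text "-\n" ""))
    (PySem.Str.splitlines (PySem.Str.replace text "-\n" "")).length 0 "" (by simp)
  simpa [pvAltGo_spec] using h
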